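-- pv_equiv track=rewrite | github.com/WncFht/GRec_public | src/token/visualize_token_embeddings.py | sort_tokens_by_category
-- ===== SOURCE A (Python) =====
-- def parse_token_category(token_name: str) -> str:
--     """
--     解析 token 名称，返回其类别
--
--     Args:
--         token_name: token 名称，如 "<a_12>", "<b_3>", "<c_2>", "<d_9>", "<| end |>"
--
--     Returns:
--         token 类别字符串
--
--     """
--     # 移除可能的空格
--     token_name = token_name.strip()
--
--     # 检查是否是主要类别格式 <x_y>
--     if token_name.startswith("<") and token_name.endswith(">"):
--         # 提取中间部分
--         inner = token_name[1:-1].strip()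
--
--         # 检查是否是 a, b, c, d 类别
--         if (
--             inner.startswith("a_")
--             or inner.startswith("b_")
--             or inner.startswith("c_")
--             or inner.startswith("d_")
--         ):
--             category = inner[0]  # 提取 a, b, c, d
--             return f"Category {category.upper()}"
--
--         # 检查是否是特殊 token
--         if (
--             "end" in inner.lower()
--             or "start" in inner.lower()
--             or "pad" in inner.lower()
--         ):
--             return "Special Token"
--
--         # 其他格式的 token
--         return "Other Format"
--
--     # 不匹配任何模式的 token
--     return "Unknown"
--
-- def sort_tokens_by_category(
--     token_names: list[str],
-- ) -> tuple[list[str], list[int]]: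
--     """
--     按照类别对 token 进行排序
--
--     Args:
--         token_names: token 名称列表
--
--     Returns:
--         (排序后的 token 名称列表, 排序后的索引列表)
--
--     """
--     # 定义类别优先级
--     category_priority = {
--         "Category A": 1,
--         "Category B": 2,
--         "Category C": 3,
--         "Category D": 4,
--         "Special Token": 5,
--         "Other Format": 6,
--         "Unknown": 7,
--     }
--
--     # 为每个 token 创建排序键
--     def get_sort_key(token_name):
--         category = parse_token_category(token_name)
--         priority = category_priority.get(category, 999)
--
--         # 对于 a, b, c, d 类别，提取数字部分进行排序
--         if category.startswith("Category "):
--             try: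
--                 # 提取 <x_y> 中的 y 部分
--                 inner = token_name[1:-1].strip()
--                 if "_" in inner:
--                     num_part = inner.split("_")[1]
--                     num = int(num_part)
--                     return (priority, num)
--                 return (priority, 0)
--             except (ValueError, IndexError):
--                 return (priority, 0)
--
--         return (priority, 0)
--
--     # 创建 (token_name, original_index) 的元组列表
--     token_with_indices = [(name, i) for i, name in enumerate(token_names)]
--
--     # 按排序键排序
--     sorted_tokens_with_indices = sorted(
--         token_with_indices, key=lambda x: get_sort_key(x[0])
--     )
--
--     # 分离排序后的 token 名称和索引
--     sorted_token_names = [item[0] for item in sorted_tokens_with_indices]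
--     sorted_indices = [item[1] for item in sorted_tokens_with_indices]
--
--     return sorted_token_names, sorted_indices
-- ===== SOURCE B (Python) =====
-- # B: bucket partition by category, per-bucket numeric sort, concatenate in priority order
-- # (A does one global sort with a composite (priority, number) key).
--
-- def parse_token_category(token_name: str) -> str:
--     token_name = token_name.strip()
--     if token_name.startswith("<") and token_name.endswith(">"):
--         inner = token_name[1:-1].strip()
--         if (
--             inner.startswith("a_")
--             or inner.startswith("b_")
--             or inner.startswith("c_")
--             or inner.startswith("d_")
--         ):
--             return f"Category {inner[0].upper()}"
--         if (
--             "end" in inner.lower()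
--             or "start" in inner.lower()
--             or "pad" in inner.lower()
--         ):
--             return "Special Token"
--         return "Other Format"
--     return "Unknown"
--
--
-- def _numeric_suffix(name: str) -> int:
--     inner = name[1:-1].strip()
--     if "_" in inner:
--         try:
--             return int(inner.split("_")[1])
--         except ValueError:
--             return 0
--     return 0
--
--
-- def sort_tokens_by_category(token_names):
--     pairs = [(name, i) for i, name in enumerate(token_names)]
--     ordered = []
--     for cat in ("Category A", "Category B", "Category C", "Category D"):
--         bucket = [p for p in pairs if parse_token_category(p[0]) == cat]
--         ordered.extend(sorted(bucket, key=lambda p: _numeric_suffix(p[0])))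
--     for cat in ("Special Token", "Other Format", "Unknown"):
--         ordered.extend(p for p in pairs if parse_token_category(p[0]) == cat)
--     return [p[0] for p in ordered], [p[1] for p in ordered]
-- ===== Notes on version B (the rewrite author's own statement) =====
-- stated objective: alternative
-- what changed: A does one global stable sort of all (name,index) pairs under a composite (category-priority, numeric-suffix) key; B instead partitions the pairs into the seven category buckets, sorts only the four Category A-D buckets by the numeric suffix, keeps the other buckets in input order, and concatenates the buckets in priority order.
import Mathlib
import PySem

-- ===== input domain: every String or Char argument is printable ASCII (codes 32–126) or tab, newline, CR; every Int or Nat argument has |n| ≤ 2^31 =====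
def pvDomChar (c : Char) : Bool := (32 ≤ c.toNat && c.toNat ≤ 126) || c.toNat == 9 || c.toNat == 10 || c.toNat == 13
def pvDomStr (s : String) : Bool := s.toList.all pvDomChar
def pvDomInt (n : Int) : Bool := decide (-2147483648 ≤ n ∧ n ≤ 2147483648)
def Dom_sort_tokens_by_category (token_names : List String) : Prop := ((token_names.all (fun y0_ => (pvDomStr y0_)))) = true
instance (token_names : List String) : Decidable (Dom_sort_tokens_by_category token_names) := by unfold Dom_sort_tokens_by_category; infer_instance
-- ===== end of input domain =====

-- B replaces A's single composite-key sort by category buckets sorted per-bucket (objective: alternative).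

-- ===== PORT A =====
def parse_token_category (token_name : String) : String :=
  let t := PySem.Str.strip token_name
  if PySem.Str.startswith t "<" && PySem.Str.endswith t ">" then
    let inner := PySem.Str.strip (PySem.Str.slice t (some 1) (some (-1)))
    if PySem.Str.startswith inner "a_" || PySem.Str.startswith inner "b_" ||
       PySem.Str.startswith inner "c_" || PySem.Str.startswith inner "d_" then
      -- inner[0]: inner starts with "a_"/"b_"/"c_"/"d_" here, so Python never raises
      match PySem.Str.pyGet? inner 0 with
      | some category =>
          -- f"Category {category.upper()}" ported on char lists (String.append is kernel-opaque)
          String.ofList ("Category ".toList ++ [PySem.Chars.upperChar category])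
      | none => ""  -- unreachable
    else if PySem.Str.isIn "end" (PySem.Str.lower inner) ||
            PySem.Str.isIn "start" (PySem.Str.lower inner) ||
            PySem.Str.isIn "pad" (PySem.Str.lower inner) then
      "Special Token"
    else
      "Other Format"
  else
    "Unknown"

def category_priority : PySem.Dict String Int :=
  PySem.Dict.ofList [("Category A", 1), ("Category B", 2), ("Category C", 3),
    ("Category D", 4), ("Special Token", 5), ("Other Format", 6), ("Unknown", 7)]

def get_sort_key (token_name : String) : Int × Int :=
  let category := parse_token_category token_name
  let priority := PySem.Dict.getD category_priority category 999
  if PySem.Str.startswith category "Category " then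
    -- try: … except (ValueError, IndexError): return (priority, 0) — the only possible
    -- error is int() raising ValueError, ported as ofStr? returning none
    let inner := PySem.Str.strip (PySem.Str.slice token_name (some 1) (some (-1)))
    if PySem.Str.isIn "_" inner then
      match PySem.Int.ofStr? ((((PySem.Str.split? inner "_").getD [])[1]?).getD "") with
      | some num => (priority, num)
      | none => (priority, 0)
    else (priority, 0)
  else (priority, 0)

def sort_tokens_by_category (token_names : List String) : List String × List Int :=
  let token_with_indices := (PySem.List.enumerate token_names).map (fun p => (p.2, p.1))
  let sorted_tokens_with_indices :=
    PySem.List.sorted2 token_with_indices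
      (fun x => (get_sort_key x.1).1) (fun x => (get_sort_key x.1).2)
  (sorted_tokens_with_indices.map (·.1), sorted_tokens_with_indices.map (·.2))

-- ===== PORT B =====
def numeric_suffix (name : String) : Int :=
  let inner := PySem.Str.strip (PySem.Str.slice name (some 1) (some (-1)))
  if PySem.Str.isIn "_" inner then
    match PySem.Int.ofStr? ((((PySem.Str.split? inner "_").getD [])[1]?).getD "") with
    | some num => num
    | none => 0
  else 0

def catBucket (pairs : List (String × Int)) (c : String) : List (String × Int) :=
  PySem.List.sorted (pairs.filter (fun p => parse_token_category p.1 == c))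
    (fun p => numeric_suffix p.1)

def plainBucket (pairs : List (String × Int)) (c : String) : List (String × Int) :=
  pairs.filter (fun p => parse_token_category p.1 == c)

def sort_tokens_by_category_alt (token_names : List String) : List String × List Int :=
  let pairs := (PySem.List.enumerate token_names).map (fun p => (p.2, p.1))
  let ordered :=
    catBucket pairs "Category A" ++ catBucket pairs "Category B" ++
    catBucket pairs "Category C" ++ catBucket pairs "Category D" ++
    plainBucket pairs "Special Token" ++ plainBucket pairs "Other Format" ++
    plainBucket pairs "Unknown"
  (ordered.map (·.1), ordered.map (·.2))

-- ===== PRECONDITION & SPEC =====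
def Spec_sort_tokens_by_category (token_names : List String) (out : List String × List Int) : Prop := out = sort_tokens_by_category_alt token_names
instance (token_names : List String) (out : List String × List Int) : Decidable (Spec_sort_tokens_by_category token_names out) := by unfold Spec_sort_tokens_by_category; infer_instance

-- ===== CLAIM (what is proved, stated in full; the proofs are below) =====
def Claim_equal_sort_tokens_by_category : Prop := ∀ (token_names : List String), Dom_sort_tokens_by_category token_names → Spec_sort_tokens_by_category token_names (sort_tokens_by_category token_names)

-- ===== LEMMAS AND PROOFS =====

-- A's composite comparator, written out
def lexLt (a b : String × Int) : Bool :=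
  decide ((get_sort_key a.1).1 < (get_sort_key b.1).1) ||
  (!decide ((get_sort_key b.1).1 < (get_sort_key a.1).1) &&
   decide ((get_sort_key a.1).2 < (get_sort_key b.1).2))

-- generic insertBy helpers for the bucket split
lemma insert_skip {α : Type} (before : α → α → Bool) (x : α) (ys zs : List α)
    (h : ∀ y ∈ ys, before x y = false) :
    PySem.List.insertBy before x (ys ++ zs) = ys ++ PySem.List.insertBy before x zs := by
  induction ys with
  | nil => rfl
  | cons y t ih =>
      simp [List.cons_append, PySem.List.insertBy, h y (by simp),
        ih (fun y hy => h y (by simp [hy]))]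

lemma insert_front {α : Type} (before : α → α → Bool) (x : α) (zs : List α)
    (h : ∀ z ∈ zs, before x z = true) :
    PySem.List.insertBy before x zs = x :: zs := by
  cases zs with
  | nil => rfl
  | cons z t => simp [PySem.List.insertBy, h z (by simp)]

lemma insert_congr_front {α : Type} (b1 b2 : α → α → Bool) (x : α) (ys zs : List α)
    (hagree : ∀ y ∈ ys, b1 x y = b2 x y) (hzs : ∀ z ∈ zs, b1 x z = true) :
    PySem.List.insertBy b1 x (ys ++ zs) = PySem.List.insertBy b2 x ys ++ zs := by
  induction ys with
  | nil => simpa using insert_front b1 x zs hzs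
  | cons y t ih =>
      have hy := hagree y (by simp)
      cases hb : b2 x y with
      | true => simp [List.cons_append, PySem.List.insertBy, hy, hb]
      | false =>
          simp [List.cons_append, PySem.List.insertBy, hy, hb,
            ih (fun y hy => hagree y (by simp [hy]))]

-- the key A sorts by, written out from parse_token_category
lemma get_sort_key_eq (s : String) :
    get_sort_key s = (PySem.Dict.getD category_priority (parse_token_category s) 999,
      if PySem.Str.startswith (parse_token_category s) "Category " then numeric_suffix s else 0) := by
  simp only [get_sort_key, numeric_suffix]
  split
  · split
    · split <;> rfl
    · rfl
  · rfl

lemma cat_of_startswith (inner pre : String) (c : Char) (cs : List Char)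
    (h : PySem.Str.startswith inner pre = true) (hc : pre.toList = c :: cs) :
    PySem.Str.pyGet? inner 0 = some c := by
  have hp := (PySem.Chars.startswith_iff inner.toList pre.toList).mp (by simpa using h)
  obtain ⟨t, ht⟩ := hp
  rw [hc] at ht
  simp [pysem, PySem.List.pyGet?_zero, ← ht]

-- parse_token_category always lands in one of the seven categories
lemma parse_mem (s : String) :
    parse_token_category s ∈ (["Category A", "Category B", "Category C", "Category D",
      "Special Token", "Other Format", "Unknown"] : List String) := by
  simp only [parse_token_category]
  split
  · split
    · rename_i h
      rcases Bool.or_eq_true_iff.mp h with h | h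
      · rcases Bool.or_eq_true_iff.mp h with h | h
        · rcases Bool.or_eq_true_iff.mp h with h | h
          · rw [cat_of_startswith _ "a_" 'a' ['_'] h rfl]; decide
          · rw [cat_of_startswith _ "b_" 'b' ['_'] h rfl]; decide
        · rw [cat_of_startswith _ "c_" 'c' ['_'] h rfl]; decide
      · rw [cat_of_startswith _ "d_" 'd' ['_'] h rfl]; decide
    · split
      · decide
      · decide
  · decide

lemma parse_cases (s : String) :
    parse_token_category s = "Category A" ∨ parse_token_category s = "Category B" ∨
    parse_token_category s = "Category C" ∨ parse_token_category s = "Category D" ∨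
    parse_token_category s = "Special Token" ∨ parse_token_category s = "Other Format" ∨
    parse_token_category s = "Unknown" := by
  have h := parse_mem s
  simpa using h

lemma mem_catBucket {xs : List (String × Int)} {c : String} {z : String × Int}
    (hz : z ∈ catBucket xs c) : parse_token_category z.1 = c := by
  unfold catBucket at hz
  rw [PySem.List.mem_sorted] at hz
  simpa using (List.mem_filter.mp hz).2

lemma mem_plainBucket {xs : List (String × Int)} {c : String} {z : String × Int}
    (hz : z ∈ plainBucket xs c) : parse_token_category z.1 = c := by
  unfold plainBucket at hz
  simpa using (List.mem_filter.mp hz).2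

lemma key_in_1 {xs : List (String × Int)} {y : String × Int}
    (hy : y ∈ catBucket xs "Category A") : get_sort_key y.1 = (1, numeric_suffix y.1) := by
  have h := mem_catBucket hy
  have e1 : PySem.Dict.getD category_priority "Category A" 999 = 1 := by decide
  have e2 : PySem.Str.startswith "Category A" "Category " = true := by decide
  rw [get_sort_key_eq, h, e1, e2, if_pos rfl]

lemma key_in_2 {xs : List (String × Int)} {y : String × Int}
    (hy : y ∈ catBucket xs "Category B") : get_sort_key y.1 = (2, numeric_suffix y.1) := by
  have h := mem_catBucket hy
  have e1 : PySem.Dict.getD category_priority "Category B" 999 = 2 := by decide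
  have e2 : PySem.Str.startswith "Category B" "Category " = true := by decide
  rw [get_sort_key_eq, h, e1, e2, if_pos rfl]

lemma key_in_3 {xs : List (String × Int)} {y : String × Int}
    (hy : y ∈ catBucket xs "Category C") : get_sort_key y.1 = (3, numeric_suffix y.1) := by
  have h := mem_catBucket hy
  have e1 : PySem.Dict.getD category_priority "Category C" 999 = 3 := by decide
  have e2 : PySem.Str.startswith "Category C" "Category " = true := by decide
  rw [get_sort_key_eq, h, e1, e2, if_pos rfl]

lemma key_in_4 {xs : List (String × Int)} {y : String × Int}
    (hy : y ∈ catBucket xs "Category D") : get_sort_key y.1 = (4, numeric_suffix y.1) := by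
  have h := mem_catBucket hy
  have e1 : PySem.Dict.getD category_priority "Category D" 999 = 4 := by decide
  have e2 : PySem.Str.startswith "Category D" "Category " = true := by decide
  rw [get_sort_key_eq, h, e1, e2, if_pos rfl]

lemma key_in_5 {xs : List (String × Int)} {y : String × Int}
    (hy : y ∈ plainBucket xs "Special Token") : get_sort_key y.1 = (5, 0) := by
  have h := mem_plainBucket hy
  have e1 : PySem.Dict.getD category_priority "Special Token" 999 = 5 := by decide
  have e2 : PySem.Str.startswith "Special Token" "Category " = false := by decide
  rw [get_sort_key_eq, h, e1, e2, if_neg Bool.false_ne_true]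

lemma key_in_6 {xs : List (String × Int)} {y : String × Int}
    (hy : y ∈ plainBucket xs "Other Format") : get_sort_key y.1 = (6, 0) := by
  have h := mem_plainBucket hy
  have e1 : PySem.Dict.getD category_priority "Other Format" 999 = 6 := by decide
  have e2 : PySem.Str.startswith "Other Format" "Category " = false := by decide
  rw [get_sort_key_eq, h, e1, e2, if_neg Bool.false_ne_true]

lemma key_in_7 {xs : List (String × Int)} {y : String × Int}
    (hy : y ∈ plainBucket xs "Unknown") : get_sort_key y.1 = (7, 0) := by
  have h := mem_plainBucket hy
  have e1 : PySem.Dict.getD category_priority "Unknown" 999 = 7 := by decide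
  have e2 : PySem.Str.startswith "Unknown" "Category " = false := by decide
  rw [get_sort_key_eq, h, e1, e2, if_neg Bool.false_ne_true]

lemma lexLt_true_of_lt {x z : String × Int}
    (h : (get_sort_key x.1).1 < (get_sort_key z.1).1) : lexLt x z = true := by
  simp [lexLt, decide_eq_true h]

lemma lexLt_false_of_gt {x z : String × Int}
    (h : (get_sort_key z.1).1 < (get_sort_key x.1).1) : lexLt x z = false := by
  simp [lexLt, decide_eq_false (lt_asymm h), decide_eq_true h]

lemma lexLt_of_eq {x z : String × Int}
    (h : (get_sort_key x.1).1 = (get_sort_key z.1).1) :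
    lexLt x z = decide ((get_sort_key x.1).2 < (get_sort_key z.1).2) := by
  simp [lexLt, h]

-- A's sorted2 is the insertBy fold with lexLt (definitional)
lemma sorted2_eq_foldl (ys : List (String × Int)) :
    PySem.List.sorted2 ys (fun x => (get_sort_key x.1).1) (fun x => (get_sort_key x.1).2)
      = ys.foldl (fun acc x => PySem.List.insertBy lexLt x acc) [] := rfl

lemma catBucket_append (xs : List (String × Int)) (x : String × Int) (c : String) :
    catBucket (xs ++ [x]) c =
      if parse_token_category x.1 = c then
        PySem.List.insertBy (fun a b => decide (numeric_suffix a.1 < numeric_suffix b.1)) x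
          (catBucket xs c)
      else catBucket xs c := by
  unfold catBucket
  rw [List.filter_append]
  by_cases h : parse_token_category x.1 = c
  · rw [if_pos h]
    rw [show List.filter (fun p => parse_token_category p.1 == c) [x] = [x] by simp [h]]
    rw [PySem.List.sorted_eq_foldl_insertBy, PySem.List.sorted_eq_foldl_insertBy,
        List.foldl_append, List.foldl_cons, List.foldl_nil]
  · rw [if_neg h]
    rw [show List.filter (fun p => parse_token_category p.1 == c) [x] = [] by simp [h],
        List.append_nil]

lemma plainBucket_append (xs : List (String × Int)) (x : String × Int) (c : String) :
    plainBucket (xs ++ [x]) c =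
      if parse_token_category x.1 = c then plainBucket xs c ++ [x] else plainBucket xs c := by
  unfold plainBucket
  rw [List.filter_append]
  by_cases h : parse_token_category x.1 = c
  · rw [if_pos h]
    rw [show List.filter (fun p => parse_token_category p.1 == c) [x] = [x] by simp [h]]
  · rw [if_neg h]
    rw [show List.filter (fun p => parse_token_category p.1 == c) [x] = [] by simp [h],
        List.append_nil]

-- the bucket split of A's stable composite-key sort
lemma split_sorted2 (xs : List (String × Int)) :
    PySem.List.sorted2 xs (fun x => (get_sort_key x.1).1) (fun x => (get_sort_key x.1).2)
    = catBucket xs "Category A" ++ catBucket xs "Category B" ++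
      catBucket xs "Category C" ++ catBucket xs "Category D" ++
      plainBucket xs "Special Token" ++ plainBucket xs "Other Format" ++
      plainBucket xs "Unknown" := by
  induction xs using List.reverseRecOn with
  | nil => rfl
  | append_singleton xs x ih =>
    rw [sorted2_eq_foldl, List.foldl_append, List.foldl_cons, List.foldl_nil,
        ← sorted2_eq_foldl, ih]
    rw [catBucket_append, catBucket_append, catBucket_append, catBucket_append,
        plainBucket_append, plainBucket_append, plainBucket_append]
    rcases parse_cases x.1 with h|h|h|h|h|h|h
    · -- parse x.1 = "Category A"
      have hk : get_sort_key x.1 = (1, numeric_suffix x.1) := by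
        have e1 : PySem.Dict.getD category_priority "Category A" 999 = 1 := by decide
        have e2 : PySem.Str.startswith "Category A" "Category " = true := by decide
        rw [get_sort_key_eq, h, e1, e2, if_pos rfl]
      rw [if_pos h, if_neg (show ¬parse_token_category x.1 = "Category B" by rw [h]; decide), if_neg (show ¬parse_token_category x.1 = "Category C" by rw [h]; decide), if_neg (show ¬parse_token_category x.1 = "Category D" by rw [h]; decide), if_neg (show ¬parse_token_category x.1 = "Special Token" by rw [h]; decide), if_neg (show ¬parse_token_category x.1 = "Other Format" by rw [h]; decide), if_neg (show ¬parse_token_category x.1 = "Unknown" by rw [h]; decide)]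
      simp only [List.append_assoc]
      have ft : ∀ z ∈ ((catBucket xs "Category B") ++ ((catBucket xs "Category C") ++ ((catBucket xs "Category D") ++ ((plainBucket xs "Special Token") ++ ((plainBucket xs "Other Format") ++ (plainBucket xs "Unknown")))))), lexLt x z = true := by
        intro z hz
        simp only [List.mem_append] at hz
        rcases hz with hz|hz|hz|hz|hz|hz
        · exact lexLt_true_of_lt (by rw [hk, key_in_2 hz]; norm_num)
        · exact lexLt_true_of_lt (by rw [hk, key_in_3 hz]; norm_num)
        · exact lexLt_true_of_lt (by rw [hk, key_in_4 hz]; norm_num)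
        · exact lexLt_true_of_lt (by rw [hk, key_in_5 hz]; norm_num)
        · exact lexLt_true_of_lt (by rw [hk, key_in_6 hz]; norm_num)
        · exact lexLt_true_of_lt (by rw [hk, key_in_7 hz]; norm_num)
      have hag : ∀ y ∈ (catBucket xs "Category A"), lexLt x y = decide (numeric_suffix x.1 < numeric_suffix y.1) :=
        fun y hy => by rw [lexLt_of_eq (by rw [hk, key_in_1 hy]), hk, key_in_1 hy]
      rw [insert_congr_front lexLt (fun a b => decide (numeric_suffix a.1 < numeric_suffix b.1)) x (catBucket xs "Category A") ((catBucket xs "Category B") ++ ((catBucket xs "Category C") ++ ((catBucket xs "Category D") ++ ((plainBucket xs "Special Token") ++ ((plainBucket xs "Other Format") ++ (plainBucket xs "Unknown")))))) hag ft]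
    · -- parse x.1 = "Category B"
      have hk : get_sort_key x.1 = (2, numeric_suffix x.1) := by
        have e1 : PySem.Dict.getD category_priority "Category B" 999 = 2 := by decide
        have e2 : PySem.Str.startswith "Category B" "Category " = true := by decide
        rw [get_sort_key_eq, h, e1, e2, if_pos rfl]
      rw [if_neg (show ¬parse_token_category x.1 = "Category A" by rw [h]; decide), if_pos h, if_neg (show ¬parse_token_category x.1 = "Category C" by rw [h]; decide), if_neg (show ¬parse_token_category x.1 = "Category D" by rw [h]; decide), if_neg (show ¬parse_token_category x.1 = "Special Token" by rw [h]; decide), if_neg (show ¬parse_token_category x.1 = "Other Format" by rw [h]; decide), if_neg (show ¬parse_token_category x.1 = "Unknown" by rw [h]; decide)]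
      simp only [List.append_assoc]
      have f1 : ∀ y ∈ (catBucket xs "Category A"), lexLt x y = false :=
        fun y hy => lexLt_false_of_gt (by rw [hk, key_in_1 hy]; norm_num)
      have ft : ∀ z ∈ ((catBucket xs "Category C") ++ ((catBucket xs "Category D") ++ ((plainBucket xs "Special Token") ++ ((plainBucket xs "Other Format") ++ (plainBucket xs "Unknown"))))), lexLt x z = true := by
        intro z hz
        simp only [List.mem_append] at hz
        rcases hz with hz|hz|hz|hz|hz
        · exact lexLt_true_of_lt (by rw [hk, key_in_3 hz]; norm_num)
        · exact lexLt_true_of_lt (by rw [hk, key_in_4 hz]; norm_num)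
        · exact lexLt_true_of_lt (by rw [hk, key_in_5 hz]; norm_num)
        · exact lexLt_true_of_lt (by rw [hk, key_in_6 hz]; norm_num)
        · exact lexLt_true_of_lt (by rw [hk, key_in_7 hz]; norm_num)
      rw [insert_skip lexLt x (catBucket xs "Category A") ((catBucket xs "Category B") ++ ((catBucket xs "Category C") ++ ((catBucket xs "Category D") ++ ((plainBucket xs "Special Token") ++ ((plainBucket xs "Other Format") ++ (plainBucket xs "Unknown")))))) f1]
      have hag : ∀ y ∈ (catBucket xs "Category B"), lexLt x y = decide (numeric_suffix x.1 < numeric_suffix y.1) :=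
        fun y hy => by rw [lexLt_of_eq (by rw [hk, key_in_2 hy]), hk, key_in_2 hy]
      rw [insert_congr_front lexLt (fun a b => decide (numeric_suffix a.1 < numeric_suffix b.1)) x (catBucket xs "Category B") ((catBucket xs "Category C") ++ ((catBucket xs "Category D") ++ ((plainBucket xs "Special Token") ++ ((plainBucket xs "Other Format") ++ (plainBucket xs "Unknown"))))) hag ft]
    · -- parse x.1 = "Category C"
      have hk : get_sort_key x.1 = (3, numeric_suffix x.1) := by
        have e1 : PySem.Dict.getD category_priority "Category C" 999 = 3 := by decide
        have e2 : PySem.Str.startswith "Category C" "Category " = true := by decide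
        rw [get_sort_key_eq, h, e1, e2, if_pos rfl]
      rw [if_neg (show ¬parse_token_category x.1 = "Category A" by rw [h]; decide), if_neg (show ¬parse_token_category x.1 = "Category B" by rw [h]; decide), if_pos h, if_neg (show ¬parse_token_category x.1 = "Category D" by rw [h]; decide), if_neg (show ¬parse_token_category x.1 = "Special Token" by rw [h]; decide), if_neg (show ¬parse_token_category x.1 = "Other Format" by rw [h]; decide), if_neg (show ¬parse_token_category x.1 = "Unknown" by rw [h]; decide)]
      simp only [List.append_assoc]
      have f1 : ∀ y ∈ (catBucket xs "Category A"), lexLt x y = false :=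
        fun y hy => lexLt_false_of_gt (by rw [hk, key_in_1 hy]; norm_num)
      have f2 : ∀ y ∈ (catBucket xs "Category B"), lexLt x y = false :=
        fun y hy => lexLt_false_of_gt (by rw [hk, key_in_2 hy]; norm_num)
      have ft : ∀ z ∈ ((catBucket xs "Category D") ++ ((plainBucket xs "Special Token") ++ ((plainBucket xs "Other Format") ++ (plainBucket xs "Unknown")))), lexLt x z = true := by
        intro z hz
        simp only [List.mem_append] at hz
        rcases hz with hz|hz|hz|hz
        · exact lexLt_true_of_lt (by rw [hk, key_in_4 hz]; norm_num)
        · exact lexLt_true_of_lt (by rw [hk, key_in_5 hz]; norm_num)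
        · exact lexLt_true_of_lt (by rw [hk, key_in_6 hz]; norm_num)
        · exact lexLt_true_of_lt (by rw [hk, key_in_7 hz]; norm_num)
      rw [insert_skip lexLt x (catBucket xs "Category A") ((catBucket xs "Category B") ++ ((catBucket xs "Category C") ++ ((catBucket xs "Category D") ++ ((plainBucket xs "Special Token") ++ ((plainBucket xs "Other Format") ++ (plainBucket xs "Unknown")))))) f1]
      rw [insert_skip lexLt x (catBucket xs "Category B") ((catBucket xs "Category C") ++ ((catBucket xs "Category D") ++ ((plainBucket xs "Special Token") ++ ((plainBucket xs "Other Format") ++ (plainBucket xs "Unknown"))))) f2]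
      have hag : ∀ y ∈ (catBucket xs "Category C"), lexLt x y = decide (numeric_suffix x.1 < numeric_suffix y.1) :=
        fun y hy => by rw [lexLt_of_eq (by rw [hk, key_in_3 hy]), hk, key_in_3 hy]
      rw [insert_congr_front lexLt (fun a b => decide (numeric_suffix a.1 < numeric_suffix b.1)) x (catBucket xs "Category C") ((catBucket xs "Category D") ++ ((plainBucket xs "Special Token") ++ ((plainBucket xs "Other Format") ++ (plainBucket xs "Unknown")))) hag ft]
    · -- parse x.1 = "Category D"
      have hk : get_sort_key x.1 = (4, numeric_suffix x.1) := by
        have e1 : PySem.Dict.getD category_priority "Category D" 999 = 4 := by decide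
        have e2 : PySem.Str.startswith "Category D" "Category " = true := by decide
        rw [get_sort_key_eq, h, e1, e2, if_pos rfl]
      rw [if_neg (show ¬parse_token_category x.1 = "Category A" by rw [h]; decide), if_neg (show ¬parse_token_category x.1 = "Category B" by rw [h]; decide), if_neg (show ¬parse_token_category x.1 = "Category C" by rw [h]; decide), if_pos h, if_neg (show ¬parse_token_category x.1 = "Special Token" by rw [h]; decide), if_neg (show ¬parse_token_category x.1 = "Other Format" by rw [h]; decide), if_neg (show ¬parse_token_category x.1 = "Unknown" by rw [h]; decide)]
      simp only [List.append_assoc]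
      have f1 : ∀ y ∈ (catBucket xs "Category A"), lexLt x y = false :=
        fun y hy => lexLt_false_of_gt (by rw [hk, key_in_1 hy]; norm_num)
      have f2 : ∀ y ∈ (catBucket xs "Category B"), lexLt x y = false :=
        fun y hy => lexLt_false_of_gt (by rw [hk, key_in_2 hy]; norm_num)
      have f3 : ∀ y ∈ (catBucket xs "Category C"), lexLt x y = false :=
        fun y hy => lexLt_false_of_gt (by rw [hk, key_in_3 hy]; norm_num)
      have ft : ∀ z ∈ ((plainBucket xs "Special Token") ++ ((plainBucket xs "Other Format") ++ (plainBucket xs "Unknown"))), lexLt x z = true := by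
        intro z hz
        simp only [List.mem_append] at hz
        rcases hz with hz|hz|hz
        · exact lexLt_true_of_lt (by rw [hk, key_in_5 hz]; norm_num)
        · exact lexLt_true_of_lt (by rw [hk, key_in_6 hz]; norm_num)
        · exact lexLt_true_of_lt (by rw [hk, key_in_7 hz]; norm_num)
      rw [insert_skip lexLt x (catBucket xs "Category A") ((catBucket xs "Category B") ++ ((catBucket xs "Category C") ++ ((catBucket xs "Category D") ++ ((plainBucket xs "Special Token") ++ ((plainBucket xs "Other Format") ++ (plainBucket xs "Unknown")))))) f1]
      rw [insert_skip lexLt x (catBucket xs "Category B") ((catBucket xs "Category C") ++ ((catBucket xs "Category D") ++ ((plainBucket xs "Special Token") ++ ((plainBucket xs "Other Format") ++ (plainBucket xs "Unknown"))))) f2]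
      rw [insert_skip lexLt x (catBucket xs "Category C") ((catBucket xs "Category D") ++ ((plainBucket xs "Special Token") ++ ((plainBucket xs "Other Format") ++ (plainBucket xs "Unknown")))) f3]
      have hag : ∀ y ∈ (catBucket xs "Category D"), lexLt x y = decide (numeric_suffix x.1 < numeric_suffix y.1) :=
        fun y hy => by rw [lexLt_of_eq (by rw [hk, key_in_4 hy]), hk, key_in_4 hy]
      rw [insert_congr_front lexLt (fun a b => decide (numeric_suffix a.1 < numeric_suffix b.1)) x (catBucket xs "Category D") ((plainBucket xs "Special Token") ++ ((plainBucket xs "Other Format") ++ (plainBucket xs "Unknown"))) hag ft]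
    · -- parse x.1 = "Special Token"
      have hk : get_sort_key x.1 = (5, 0) := by
        have e1 : PySem.Dict.getD category_priority "Special Token" 999 = 5 := by decide
        have e2 : PySem.Str.startswith "Special Token" "Category " = false := by decide
        rw [get_sort_key_eq, h, e1, e2, if_neg Bool.false_ne_true]
      rw [if_neg (show ¬parse_token_category x.1 = "Category A" by rw [h]; decide), if_neg (show ¬parse_token_category x.1 = "Category B" by rw [h]; decide), if_neg (show ¬parse_token_category x.1 = "Category C" by rw [h]; decide), if_neg (show ¬parse_token_category x.1 = "Category D" by rw [h]; decide), if_pos h, if_neg (show ¬parse_token_category x.1 = "Other Format" by rw [h]; decide), if_neg (show ¬parse_token_category x.1 = "Unknown" by rw [h]; decide)]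
      simp only [List.append_assoc]
      have f1 : ∀ y ∈ (catBucket xs "Category A"), lexLt x y = false :=
        fun y hy => lexLt_false_of_gt (by rw [hk, key_in_1 hy]; norm_num)
      have f2 : ∀ y ∈ (catBucket xs "Category B"), lexLt x y = false :=
        fun y hy => lexLt_false_of_gt (by rw [hk, key_in_2 hy]; norm_num)
      have f3 : ∀ y ∈ (catBucket xs "Category C"), lexLt x y = false :=
        fun y hy => lexLt_false_of_gt (by rw [hk, key_in_3 hy]; norm_num)
      have f4 : ∀ y ∈ (catBucket xs "Category D"), lexLt x y = false :=
        fun y hy => lexLt_false_of_gt (by rw [hk, key_in_4 hy]; norm_num)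
      have f5 : ∀ y ∈ (plainBucket xs "Special Token"), lexLt x y = false :=
        fun y hy => by rw [lexLt_of_eq (by rw [hk, key_in_5 hy]), hk, key_in_5 hy]; norm_num
      have ft : ∀ z ∈ ((plainBucket xs "Other Format") ++ (plainBucket xs "Unknown")), lexLt x z = true := by
        intro z hz
        simp only [List.mem_append] at hz
        rcases hz with hz|hz
        · exact lexLt_true_of_lt (by rw [hk, key_in_6 hz]; norm_num)
        · exact lexLt_true_of_lt (by rw [hk, key_in_7 hz]; norm_num)
      rw [insert_skip lexLt x (catBucket xs "Category A") ((catBucket xs "Category B") ++ ((catBucket xs "Category C") ++ ((catBucket xs "Category D") ++ ((plainBucket xs "Special Token") ++ ((plainBucket xs "Other Format") ++ (plainBucket xs "Unknown")))))) f1]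
      rw [insert_skip lexLt x (catBucket xs "Category B") ((catBucket xs "Category C") ++ ((catBucket xs "Category D") ++ ((plainBucket xs "Special Token") ++ ((plainBucket xs "Other Format") ++ (plainBucket xs "Unknown"))))) f2]
      rw [insert_skip lexLt x (catBucket xs "Category C") ((catBucket xs "Category D") ++ ((plainBucket xs "Special Token") ++ ((plainBucket xs "Other Format") ++ (plainBucket xs "Unknown")))) f3]
      rw [insert_skip lexLt x (catBucket xs "Category D") ((plainBucket xs "Special Token") ++ ((plainBucket xs "Other Format") ++ (plainBucket xs "Unknown"))) f4]
      rw [insert_skip lexLt x (plainBucket xs "Special Token") ((plainBucket xs "Other Format") ++ (plainBucket xs "Unknown")) f5]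
      rw [insert_front lexLt x ((plainBucket xs "Other Format") ++ (plainBucket xs "Unknown")) ft, List.singleton_append]
    · -- parse x.1 = "Other Format"
      have hk : get_sort_key x.1 = (6, 0) := by
        have e1 : PySem.Dict.getD category_priority "Other Format" 999 = 6 := by decide
        have e2 : PySem.Str.startswith "Other Format" "Category " = false := by decide
        rw [get_sort_key_eq, h, e1, e2, if_neg Bool.false_ne_true]
      rw [if_neg (show ¬parse_token_category x.1 = "Category A" by rw [h]; decide), if_neg (show ¬parse_token_category x.1 = "Category B" by rw [h]; decide), if_neg (show ¬parse_token_category x.1 = "Category C" by rw [h]; decide), if_neg (show ¬parse_token_category x.1 = "Category D" by rw [h]; decide), if_neg (show ¬parse_token_category x.1 = "Special Token" by rw [h]; decide), if_pos h, if_neg (show ¬parse_token_category x.1 = "Unknown" by rw [h]; decide)]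
      simp only [List.append_assoc]
      have f1 : ∀ y ∈ (catBucket xs "Category A"), lexLt x y = false :=
        fun y hy => lexLt_false_of_gt (by rw [hk, key_in_1 hy]; norm_num)
      have f2 : ∀ y ∈ (catBucket xs "Category B"), lexLt x y = false :=
        fun y hy => lexLt_false_of_gt (by rw [hk, key_in_2 hy]; norm_num)
      have f3 : ∀ y ∈ (catBucket xs "Category C"), lexLt x y = false :=
        fun y hy => lexLt_false_of_gt (by rw [hk, key_in_3 hy]; norm_num)
      have f4 : ∀ y ∈ (catBucket xs "Category D"), lexLt x y = false :=
        fun y hy => lexLt_false_of_gt (by rw [hk, key_in_4 hy]; norm_num)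
      have f5 : ∀ y ∈ (plainBucket xs "Special Token"), lexLt x y = false :=
        fun y hy => lexLt_false_of_gt (by rw [hk, key_in_5 hy]; norm_num)
      have f6 : ∀ y ∈ (plainBucket xs "Other Format"), lexLt x y = false :=
        fun y hy => by rw [lexLt_of_eq (by rw [hk, key_in_6 hy]), hk, key_in_6 hy]; norm_num
      have ft : ∀ z ∈ (plainBucket xs "Unknown"), lexLt x z = true := by
        intro z hz
        have hz := hz
        exact lexLt_true_of_lt (by rw [hk, key_in_7 hz]; norm_num)
      rw [insert_skip lexLt x (catBucket xs "Category A") ((catBucket xs "Category B") ++ ((catBucket xs "Category C") ++ ((catBucket xs "Category D") ++ ((plainBucket xs "Special Token") ++ ((plainBucket xs "Other Format") ++ (plainBucket xs "Unknown")))))) f1]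
      rw [insert_skip lexLt x (catBucket xs "Category B") ((catBucket xs "Category C") ++ ((catBucket xs "Category D") ++ ((plainBucket xs "Special Token") ++ ((plainBucket xs "Other Format") ++ (plainBucket xs "Unknown"))))) f2]
      rw [insert_skip lexLt x (catBucket xs "Category C") ((catBucket xs "Category D") ++ ((plainBucket xs "Special Token") ++ ((plainBucket xs "Other Format") ++ (plainBucket xs "Unknown")))) f3]
      rw [insert_skip lexLt x (catBucket xs "Category D") ((plainBucket xs "Special Token") ++ ((plainBucket xs "Other Format") ++ (plainBucket xs "Unknown"))) f4]
      rw [insert_skip lexLt x (plainBucket xs "Special Token") ((plainBucket xs "Other Format") ++ (plainBucket xs "Unknown")) f5]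
      rw [insert_skip lexLt x (plainBucket xs "Other Format") (plainBucket xs "Unknown") f6]
      rw [insert_front lexLt x (plainBucket xs "Unknown") ft, List.singleton_append]
    · -- parse x.1 = "Unknown"
      have hk : get_sort_key x.1 = (7, 0) := by
        have e1 : PySem.Dict.getD category_priority "Unknown" 999 = 7 := by decide
        have e2 : PySem.Str.startswith "Unknown" "Category " = false := by decide
        rw [get_sort_key_eq, h, e1, e2, if_neg Bool.false_ne_true]
      rw [if_neg (show ¬parse_token_category x.1 = "Category A" by rw [h]; decide), if_neg (show ¬parse_token_category x.1 = "Category B" by rw [h]; decide), if_neg (show ¬parse_token_category x.1 = "Category C" by rw [h]; decide), if_neg (show ¬parse_token_category x.1 = "Category D" by rw [h]; decide), if_neg (show ¬parse_token_category x.1 = "Special Token" by rw [h]; decide), if_neg (show ¬parse_token_category x.1 = "Other Format" by rw [h]; decide), if_pos h]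
      simp only [List.append_assoc]
      have f1 : ∀ y ∈ (catBucket xs "Category A"), lexLt x y = false :=
        fun y hy => lexLt_false_of_gt (by rw [hk, key_in_1 hy]; norm_num)
      have f2 : ∀ y ∈ (catBucket xs "Category B"), lexLt x y = false :=
        fun y hy => lexLt_false_of_gt (by rw [hk, key_in_2 hy]; norm_num)
      have f3 : ∀ y ∈ (catBucket xs "Category C"), lexLt x y = false :=
        fun y hy => lexLt_false_of_gt (by rw [hk, key_in_3 hy]; norm_num)
      have f4 : ∀ y ∈ (catBucket xs "Category D"), lexLt x y = false :=
        fun y hy => lexLt_false_of_gt (by rw [hk, key_in_4 hy]; norm_num)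
      have f5 : ∀ y ∈ (plainBucket xs "Special Token"), lexLt x y = false :=
        fun y hy => lexLt_false_of_gt (by rw [hk, key_in_5 hy]; norm_num)
      have f6 : ∀ y ∈ (plainBucket xs "Other Format"), lexLt x y = false :=
        fun y hy => lexLt_false_of_gt (by rw [hk, key_in_6 hy]; norm_num)
      have f7 : ∀ y ∈ (plainBucket xs "Unknown"), lexLt x y = false :=
        fun y hy => by rw [lexLt_of_eq (by rw [hk, key_in_7 hy]), hk, key_in_7 hy]; norm_num
      rw [insert_skip lexLt x (catBucket xs "Category A") ((catBucket xs "Category B") ++ ((catBucket xs "Category C") ++ ((catBucket xs "Category D") ++ ((plainBucket xs "Special Token") ++ ((plainBucket xs "Other Format") ++ (plainBucket xs "Unknown")))))) f1]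
      rw [insert_skip lexLt x (catBucket xs "Category B") ((catBucket xs "Category C") ++ ((catBucket xs "Category D") ++ ((plainBucket xs "Special Token") ++ ((plainBucket xs "Other Format") ++ (plainBucket xs "Unknown"))))) f2]
      rw [insert_skip lexLt x (catBucket xs "Category C") ((catBucket xs "Category D") ++ ((plainBucket xs "Special Token") ++ ((plainBucket xs "Other Format") ++ (plainBucket xs "Unknown")))) f3]
      rw [insert_skip lexLt x (catBucket xs "Category D") ((plainBucket xs "Special Token") ++ ((plainBucket xs "Other Format") ++ (plainBucket xs "Unknown"))) f4]
      rw [insert_skip lexLt x (plainBucket xs "Special Token") ((plainBucket xs "Other Format") ++ (plainBucket xs "Unknown")) f5]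
      rw [insert_skip lexLt x (plainBucket xs "Other Format") (plainBucket xs "Unknown") f6]
      rw [show PySem.List.insertBy lexLt x (plainBucket xs "Unknown") = (plainBucket xs "Unknown") ++ [x] from
        PySem.List.insertBy_of_forall_not_before lexLt x (plainBucket xs "Unknown") f7]

-- ===== VERDICT (by name: the statement is the Claim_ definition above) =====
theorem sort_tokens_by_category_spec : Claim_equal_sort_tokens_by_category := by
  intro token_names _
  unfold Spec_sort_tokens_by_category sort_tokens_by_category sort_tokens_by_category_alt
  simp only [split_sorted2]
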